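-- pv_equiv track=rewrite | github.com/KoschavtcevDaniel/Cm | 2.1.py | new_cond
-- ===== SOURCE A (Python) =====
-- def new_cond(a, b, n):
--     tran = [[None] * n for i in range(n)]
--     tempa = [[None] * n for i in range(n)]
--     tempb = [None] * n
--     for i in range(n):
--         for j in range(n):
--             tran[j][i] = a[i][j]
--     for i in range(n):
--         s2 = 0
--         for j in range(n):
--             s1 = 0
--             for k in range(n):
--                 s1 += tran[j][k] * a[k][i]
--             s2 += tran[i][j] * b[j]
--             tempa[i][j] = s1
--         tempb[i] = s2
--     return tempa, tempb
-- ===== SOURCE B (Python) =====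
-- def new_cond(a, b, n):
--     # Rank-1-update accumulation: no transpose, k outermost; same exact results.
--     tempa = [[0] * n for _ in range(n)]
--     tempb = [0] * n
--     for k in range(n):
--         row = a[k]
--         tempb = [tempb[i] + row[i] * b[k] for i in range(n)]
--         tempa = [[tempa[i][j] + row[i] * row[j] for j in range(n)] for i in range(n)]
--     return tempa, tempb
-- ===== Notes on version B (the rewrite author's own statement) =====
-- stated objective: alternative
-- what changed: Replaces explicit transpose construction plus per-entry dot products (ijk order) with a transpose-free rank-1 update accumulation over rows (k outermost), rebuilding the accumulators functionally each step.
import Mathlib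
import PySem

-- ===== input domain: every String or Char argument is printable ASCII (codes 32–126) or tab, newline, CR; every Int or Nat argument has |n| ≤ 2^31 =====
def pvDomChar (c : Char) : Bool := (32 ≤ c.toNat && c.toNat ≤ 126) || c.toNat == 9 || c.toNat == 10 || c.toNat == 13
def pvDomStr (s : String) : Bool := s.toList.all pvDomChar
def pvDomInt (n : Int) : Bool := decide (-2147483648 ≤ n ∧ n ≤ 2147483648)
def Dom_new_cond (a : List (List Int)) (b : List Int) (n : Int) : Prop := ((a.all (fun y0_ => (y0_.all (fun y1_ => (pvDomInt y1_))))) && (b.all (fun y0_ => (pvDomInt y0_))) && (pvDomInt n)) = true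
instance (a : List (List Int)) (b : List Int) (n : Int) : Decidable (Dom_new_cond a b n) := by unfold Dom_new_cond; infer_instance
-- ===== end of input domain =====

-- B replaces A's explicit transpose plus per-entry dot products by a transpose-free
-- rank-1-update accumulation over the rows of a (k outermost); same exact results.

-- grid read m[i][j] (0 default only reachable outside Pre_) and write m[i][j] = v
def pvGG (m : List (List Int)) (i j : Nat) : Int := (m.getD i []).getD j 0
def pvGS (m : List (List Int)) (i j : Nat) (v : Int) : List (List Int) :=
  m.set i ((m.getD i []).set j v)

-- ===== PORT A =====
def new_cond (a : List (List Int)) (b : List Int) (n : Int) : List (List Int) × List Int :=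
  let N := n.toNat
  let tran := (List.range N).foldl
    (fun tr i => (List.range N).foldl (fun tr j => pvGS tr j i (pvGG a i j)) tr)
    (List.replicate N (List.replicate N (0:Int)))
  (List.range N).foldl
    (fun (st : List (List Int) × List Int) i =>
      let p := (List.range N).foldl
        (fun (p : List (List Int) × Int) j =>
          let s1 := (List.range N).foldl (fun s k => s + pvGG tran j k * pvGG a k i) 0
          (pvGS p.1 i j s1, p.2 + pvGG tran i j * b.getD j 0))
        (st.1, 0)
      (p.1, st.2.set i p.2))
    (List.replicate N (List.replicate N (0:Int)), List.replicate N (0:Int))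

-- ===== PORT B =====
def new_cond_alt (a : List (List Int)) (b : List Int) (n : Int) : List (List Int) × List Int :=
  let N := n.toNat
  (List.range N).foldl
    (fun (st : List (List Int) × List Int) k =>
      let row := a.getD k []
      let tb := (List.range N).map (fun i => st.2.getD i 0 + row.getD i 0 * b.getD k 0)
      let ta := (List.range N).map
        (fun i => (List.range N).map (fun j => pvGG st.1 i j + row.getD i 0 * row.getD j 0))
      (ta, tb))
    (List.replicate N (List.replicate N (0:Int)), List.replicate N (0:Int))

-- ===== PRECONDITION & SPEC =====
-- Pre_: exactly where Python A returns normally (it raises IndexError when n exceeds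
-- the number of rows of a, the length of a used row, or the length of b).
def Pre_new_cond (a : List (List Int)) (b : List Int) (n : Int) : Prop :=
  n ≤ (a.length : Int) ∧ n ≤ (b.length : Int) ∧ ∀ r ∈ a.take n.toNat, n ≤ (r.length : Int)
instance (a : List (List Int)) (b : List Int) (n : Int) : Decidable (Pre_new_cond a b n) := by
  unfold Pre_new_cond; infer_instance
def pvWitness_new_cond : List (List Int) × List Int × Int := ([[1, 2], [3, 4]], ([5, 6], 2))

def Spec_new_cond (a : List (List Int)) (b : List Int) (n : Int) (out : List (List Int) × List Int) : Prop := out = new_cond_alt a b n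
instance (a : List (List Int)) (b : List Int) (n : Int) (out : List (List Int) × List Int) : Decidable (Spec_new_cond a b n out) := by unfold Spec_new_cond; infer_instance

-- ===== CLAIM (what is proved, stated in full; the proofs are below) =====
def Claim_equal_new_cond : Prop := ∀ (a : List (List Int)) (b : List Int) (n : Int), Dom_new_cond a b n → Pre_new_cond a b n → Spec_new_cond a b n (new_cond a b n)

-- ===== LEMMAS AND PROOFS =====

-- rectangular N×N shape
def Rect (N : Nat) (m : List (List Int)) : Prop := m.length = N ∧ ∀ r ∈ m, r.length = N

theorem rect_replicate (N : Nat) : Rect N (List.replicate N (List.replicate N (0:Int))) := by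
  constructor
  · simp
  · intro r hr; simp_all [List.eq_of_mem_replicate hr]

theorem getD_row_length {N : ℕ} {m : List (List Int)} (h : Rect N m) {i : Nat} (hi : i < N) :
    (m.getD i []).length = N := by
  have hil : i < m.length := h.1 ▸ hi
  rw [List.getD_eq_getElem?_getD, List.getElem?_eq_getElem hil]
  simpa using h.2 _ (List.getElem_mem hil)

theorem rect_pvGS {N : ℕ} {m : List (List Int)} (h : Rect N m) {i j : Nat} (hi : i < N)
    (v : Int) : Rect N (pvGS m i j v) := by
  constructor
  · simpa [pvGS] using h.1
  · intro r hr
    rcases List.mem_or_eq_of_mem_set hr with hr | rfl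
    · exact h.2 _ hr
    · simpa using getD_row_length h hi

theorem getD_set {α : Type} (l : List α) (i p : Nat) (v d : α) (hi : i < l.length) :
    (l.set i v).getD p d = if p = i then v else l.getD p d := by
  rw [List.getD_eq_getElem?_getD, List.getD_eq_getElem?_getD, List.getElem?_set]
  by_cases hpi : p = i
  · simp [hpi, hi]
  · simp [hpi, Ne.symm hpi]

theorem pvGG_pvGS {N : ℕ} {m : List (List Int)} (h : Rect N m) (i j : Nat) (hi : i < N)
    (hj : j < N) (v : Int) (p q : Nat) :
    pvGG (pvGS m i j v) p q = if p = i ∧ q = j then v else pvGG m p q := by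
  have hil : i < m.length := h.1 ▸ hi
  have hrow : j < (m.getD i []).length := by rw [getD_row_length h hi]; exact hj
  unfold pvGG pvGS
  rw [getD_set _ _ _ _ _ hil]
  by_cases hpi : p = i
  · subst hpi
    rw [if_pos rfl, getD_set _ _ _ _ _ hrow]
    by_cases hqj : q = j <;> simp [hqj]
  · simp [hpi]

theorem list_eq_of_getD {N : ℕ} {l l' : List Int} (h : l.length = N) (h' : l'.length = N)
    (he : ∀ i, i < N → l.getD i 0 = l'.getD i 0) : l = l' := by
  apply List.ext_getElem (h.trans h'.symm)
  intro i h1 h2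
  have := he i (h ▸ h1)
  rwa [List.getD_eq_getElem _ _ h1, List.getD_eq_getElem _ _ h2] at this

theorem grid_eq_of_pvGG {N : ℕ} {m m' : List (List Int)} (h : Rect N m) (h' : Rect N m')
    (he : ∀ i j, i < N → j < N → pvGG m i j = pvGG m' i j) : m = m' := by
  apply List.ext_getElem (h.1.trans h'.1.symm)
  intro i h1 h2
  have hi : i < N := h.1 ▸ h1
  have hr : m[i] = m.getD i [] := by rw [List.getD_eq_getElem _ _ h1]
  have hr' : m'[i] = m'.getD i [] := by rw [List.getD_eq_getElem _ _ h2]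
  rw [hr, hr']
  exact list_eq_of_getD (getD_row_length h hi) (getD_row_length h' hi)
    (fun j hj => he i j hi hj)

-- characterisation of A's transpose grid
theorem tran_inner (a : List (List Int)) (N i : Nat) (hi : i < N) (js : List Nat)
    (hjs : ∀ j ∈ js, j < N) (tr : List (List Int)) (h : Rect N tr) :
    Rect N (js.foldl (fun tr j => pvGS tr j i (pvGG a i j)) tr) ∧
    ∀ p q, p < N → q < N →
      pvGG (js.foldl (fun tr j => pvGS tr j i (pvGG a i j)) tr) p q =
        if q = i ∧ p ∈ js then pvGG a i p else pvGG tr p q := by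
  induction js generalizing tr with
  | nil => exact ⟨h, fun p q _ _ => by simp⟩
  | cons j js ih =>
    have hjN : j < N := hjs j (by simp)
    have h1 : Rect N (pvGS tr j i (pvGG a i j)) := rect_pvGS h hjN _
    obtain ⟨hR, hG⟩ := ih (fun x hx => hjs x (by simp [hx])) _ h1
    refine ⟨hR, fun p q hp hq => ?_⟩
    rw [List.foldl_cons, hG p q hp hq, pvGG_pvGS h j i hjN hi (pvGG a i j) p q]
    by_cases hqi : q = i <;> by_cases hpl : p ∈ js <;> by_cases hpj : p = j <;>
      simp_all
theorem tran_outer (a : List (List Int)) (N : Nat) (is : List Nat)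
    (his : ∀ i ∈ is, i < N) (tr : List (List Int)) (h : Rect N tr) :
    Rect N (is.foldl (fun tr i => (List.range N).foldl (fun tr j => pvGS tr j i (pvGG a i j)) tr) tr) ∧
    ∀ p q, p < N → q < N →
      pvGG (is.foldl (fun tr i => (List.range N).foldl (fun tr j => pvGS tr j i (pvGG a i j)) tr) tr) p q =
        if q ∈ is then pvGG a q p else pvGG tr p q := by
  induction is generalizing tr with
  | nil => exact ⟨h, fun p q _ _ => by simp⟩
  | cons i is ih =>
    have hiN : i < N := his i (by simp)
    obtain ⟨hR1, hG1⟩ := tran_inner a N i hiN (List.range N) (by simp) tr h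
    obtain ⟨hR, hG⟩ := ih (fun x hx => his x (by simp [hx])) _ hR1
    refine ⟨hR, fun p q hp hq => ?_⟩
    rw [List.foldl_cons, hG p q hp hq, hG1 p q hp hq]
    by_cases hqi : q = i <;> by_cases hql : q ∈ is <;> simp_all

-- closed forms for the entries
def pvS1 (a tran : List (List Int)) (N i j : Nat) : Int :=
  ((List.range N).map (fun k => pvGG tran j k * pvGG a k i)).sum
def pvS2 (tran : List (List Int)) (b : List Int) (N i : Nat) : Int :=
  ((List.range N).map (fun j => pvGG tran i j * b.getD j 0)).sum

-- characterisation of A's main double loop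
theorem main_inner (a tran : List (List Int)) (b : List Int) (N i : Nat) (hi : i < N)
    (js : List Nat) (hjs : ∀ j ∈ js, j < N) (ta : List (List Int)) (s2 : Int)
    (h : Rect N ta) :
    Rect N (js.foldl (fun (p : List (List Int) × Int) j =>
        ((pvGS p.1 i j ((List.range N).foldl (fun s k => s + pvGG tran j k * pvGG a k i) 0)),
          p.2 + pvGG tran i j * b.getD j 0)) (ta, s2)).1 ∧
    (∀ p q, p < N → q < N →
      pvGG (js.foldl (fun (p : List (List Int) × Int) j =>
        ((pvGS p.1 i j ((List.range N).foldl (fun s k => s + pvGG tran j k * pvGG a k i) 0)),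
          p.2 + pvGG tran i j * b.getD j 0)) (ta, s2)).1 p q =
        if p = i ∧ q ∈ js then pvS1 a tran N i q else pvGG ta p q) ∧
    (js.foldl (fun (p : List (List Int) × Int) j =>
        ((pvGS p.1 i j ((List.range N).foldl (fun s k => s + pvGG tran j k * pvGG a k i) 0)),
          p.2 + pvGG tran i j * b.getD j 0)) (ta, s2)).2 =
      s2 + (js.map (fun j => pvGG tran i j * b.getD j 0)).sum := by
  induction js generalizing ta s2 with
  | nil => exact ⟨h, fun p q _ _ => by simp, by simp⟩
  | cons j js ih =>
    have hjN : j < N := hjs j (by simp)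
    have h1 : Rect N (pvGS ta i j
        ((List.range N).foldl (fun s k => s + pvGG tran j k * pvGG a k i) 0)) :=
      rect_pvGS h hi _
    obtain ⟨hR, hG, hS⟩ := ih (fun x hx => hjs x (by simp [hx])) _ _ h1
    refine ⟨hR, fun p q hp hq => ?_, ?_⟩
    · rw [List.foldl_cons, hG p q hp hq, pvGG_pvGS h i j hi hjN
        ((List.range N).foldl (fun s k => s + pvGG tran j k * pvGG a k i) 0) p q]
      have hs1 : (List.range N).foldl (fun s k => s + pvGG tran j k * pvGG a k i) 0 =
          pvS1 a tran N i j := by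
        rw [PySem.List.foldl_add (List.range N) (fun k => pvGG tran j k * pvGG a k i) 0,
          zero_add, pvS1]
      by_cases hpi : p = i <;> by_cases hql : q ∈ js <;> by_cases hqj : q = j <;>
        simp_all
    · rw [List.foldl_cons, hS]; simp only [List.map_cons, List.sum_cons]; ring
theorem main_outer (a tran : List (List Int)) (b : List Int) (N : Nat) (is : List Nat)
    (his : ∀ i ∈ is, i < N) (st : List (List Int) × List Int)
    (h : Rect N st.1) (hl : st.2.length = N) :
    Rect N (is.foldl (fun (st : List (List Int) × List Int) i =>
        (((List.range N).foldl (fun (p : List (List Int) × Int) j =>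
            ((pvGS p.1 i j ((List.range N).foldl (fun s k => s + pvGG tran j k * pvGG a k i) 0)),
              p.2 + pvGG tran i j * b.getD j 0)) (st.1, 0)).1,
          st.2.set i ((List.range N).foldl (fun (p : List (List Int) × Int) j =>
            ((pvGS p.1 i j ((List.range N).foldl (fun s k => s + pvGG tran j k * pvGG a k i) 0)),
              p.2 + pvGG tran i j * b.getD j 0)) (st.1, 0)).2)) st).1 ∧
    (is.foldl (fun (st : List (List Int) × List Int) i =>
        (((List.range N).foldl (fun (p : List (List Int) × Int) j =>
            ((pvGS p.1 i j ((List.range N).foldl (fun s k => s + pvGG tran j k * pvGG a k i) 0)),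
              p.2 + pvGG tran i j * b.getD j 0)) (st.1, 0)).1,
          st.2.set i ((List.range N).foldl (fun (p : List (List Int) × Int) j =>
            ((pvGS p.1 i j ((List.range N).foldl (fun s k => s + pvGG tran j k * pvGG a k i) 0)),
              p.2 + pvGG tran i j * b.getD j 0)) (st.1, 0)).2)) st).2.length = N ∧
    (∀ p q, p < N → q < N →
      pvGG (is.foldl (fun (st : List (List Int) × List Int) i =>
        (((List.range N).foldl (fun (p : List (List Int) × Int) j =>
            ((pvGS p.1 i j ((List.range N).foldl (fun s k => s + pvGG tran j k * pvGG a k i) 0)),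
              p.2 + pvGG tran i j * b.getD j 0)) (st.1, 0)).1,
          st.2.set i ((List.range N).foldl (fun (p : List (List Int) × Int) j =>
            ((pvGS p.1 i j ((List.range N).foldl (fun s k => s + pvGG tran j k * pvGG a k i) 0)),
              p.2 + pvGG tran i j * b.getD j 0)) (st.1, 0)).2)) st).1 p q =
        if p ∈ is then pvS1 a tran N p q else pvGG st.1 p q) ∧
    (∀ p, p < N →
      (is.foldl (fun (st : List (List Int) × List Int) i =>
        (((List.range N).foldl (fun (p : List (List Int) × Int) j =>
            ((pvGS p.1 i j ((List.range N).foldl (fun s k => s + pvGG tran j k * pvGG a k i) 0)),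
              p.2 + pvGG tran i j * b.getD j 0)) (st.1, 0)).1,
          st.2.set i ((List.range N).foldl (fun (p : List (List Int) × Int) j =>
            ((pvGS p.1 i j ((List.range N).foldl (fun s k => s + pvGG tran j k * pvGG a k i) 0)),
              p.2 + pvGG tran i j * b.getD j 0)) (st.1, 0)).2)) st).2.getD p 0 =
        if p ∈ is then pvS2 tran b N p else st.2.getD p 0) := by
  induction is generalizing st with
  | nil => exact ⟨h, hl, fun p q _ _ => by simp, fun p _ => by simp⟩
  | cons i is ih =>
    have hiN : i < N := his i (by simp)
    obtain ⟨hR1, hG1, hS1⟩ := main_inner a tran b N i hiN (List.range N) (by simp) st.1 0 h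
    rw [List.foldl_cons]
    set X := (List.range N).foldl (fun (p : List (List Int) × Int) j =>
        ((pvGS p.1 i j ((List.range N).foldl (fun s k => s + pvGG tran j k * pvGG a k i) 0)),
          p.2 + pvGG tran i j * b.getD j 0)) (st.1, 0) with hX
    have hset : i < st.2.length := hl ▸ hiN
    obtain ⟨hR, hL, hG, hB⟩ := ih (fun x hx => his x (by simp [hx]))
      (X.1, st.2.set i X.2) hR1 (by simpa using hl)
    refine ⟨hR, hL, fun p q hp hq => ?_, fun p hp => ?_⟩
    · rw [hG p q hp hq]
      simp only
      rw [hG1 p q hp hq]; simp only [List.mem_cons]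
      by_cases hpl : p ∈ is
      · simp [hpl]
      · by_cases hpi : p = i
        · simp [hpi, List.mem_range.mpr hq]
        · simp [hpl, hpi]
    · rw [hB p hp]
      simp only
      rw [getD_set _ _ _ _ _ hset, hS1]; simp only [List.mem_cons]
      by_cases hpl : p ∈ is
      · simp [hpl]
      · by_cases hpi : p = i
        · simp [hpi, pvS2]
        · simp [hpl, hpi]

-- closed forms for B's accumulators after m steps
def pvFB (a : List (List Int)) (i j m : Nat) : Int :=
  ((List.range m).map (fun k => pvGG a k i * pvGG a k j)).sum
def pvGB (a : List (List Int)) (b : List Int) (i m : Nat) : Int :=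
  ((List.range m).map (fun k => pvGG a k i * b.getD k 0)).sum

theorem alt_fold (a : List (List Int)) (b : List Int) (N m : Nat) :
    (List.range m).foldl (fun (st : List (List Int) × List Int) k =>
        ((List.range N).map (fun i => (List.range N).map
            (fun j => pvGG st.1 i j + (a.getD k []).getD i 0 * (a.getD k []).getD j 0)),
          (List.range N).map (fun i => st.2.getD i 0 + (a.getD k []).getD i 0 * b.getD k 0)))
      (List.replicate N (List.replicate N (0:Int)), List.replicate N (0:Int)) =
    ((List.range N).map (fun i => (List.range N).map (fun j => pvFB a i j m)),
      (List.range N).map (fun i => pvGB a b i m)) := by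
  induction m with
  | zero =>
    simp only [List.range_zero, List.foldl_nil, pvFB, pvGB, List.map_nil, List.sum_nil]
    refine Prod.ext ?_ ?_ <;> simp [List.map_const']
  | succ m ih =>
    rw [List.range_succ, List.foldl_append, ih, List.foldl_cons, List.foldl_nil]
    refine Prod.ext ?_ ?_ <;> simp only
    · apply List.map_congr_left
      intro i hi
      apply List.map_congr_left
      intro j hj
      rw [List.mem_range] at hi hj
      have : pvGG ((List.range N).map (fun i => (List.range N).map (fun j => pvFB a i j m))) i j
          = pvFB a i j m := by
        unfold pvGG
        rw [PySem.List.getD_map_range _ _ _ _ hi, PySem.List.getD_map_range _ _ _ _ hj]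
      rw [this, pvFB, pvFB, List.range_succ, List.map_append, List.sum_append]
      simp [pvGG]
    · apply List.map_congr_left
      intro i hi
      rw [List.mem_range] at hi
      rw [PySem.List.getD_map_range _ _ _ _ hi]
      rw [pvGB, pvGB, List.range_succ, List.map_append, List.sum_append]
      simp [pvGG]

theorem rect_map_range (N : Nat) (f : Nat → Nat → Int) :
    Rect N ((List.range N).map (fun i => (List.range N).map (fun j => f i j))) := by
  constructor
  · simp
  · intro r hr
    obtain ⟨i, _, rfl⟩ := List.mem_map.mp hr
    simp

-- ===== VERDICT (by name: the statement is the Claim_ definition above) =====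
theorem new_cond_spec : Claim_equal_new_cond := by
  intro a b n _ _
  unfold Spec_new_cond new_cond new_cond_alt
  simp only []
  set N := n.toNat with hN
  -- tran characterisation
  obtain ⟨hTR, hTG⟩ := tran_outer a N (List.range N) (by simp) _ (rect_replicate N)
  set tran := (List.range N).foldl
    (fun tr i => (List.range N).foldl (fun tr j => pvGS tr j i (pvGG a i j)) tr)
    (List.replicate N (List.replicate N (0:Int))) with htran
  have htranGG : ∀ p q, p < N → q < N → pvGG tran p q = pvGG a q p := by
    intro p q hp hq
    rw [htran, hTG p q hp hq, if_pos (List.mem_range.mpr hq)]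
  -- A's result characterisation
  obtain ⟨hAR, hAL, hAG, hAB⟩ := main_outer a tran b N (List.range N) (by simp)
    (List.replicate N (List.replicate N (0:Int)), List.replicate N (0:Int))
    (rect_replicate N) (by simp)
  -- B's result (closed form)
  rw [alt_fold a b N N]
  refine Prod.ext ?_ ?_
  · refine grid_eq_of_pvGG hAR (rect_map_range N _) ?_
    intro i j hi hj
    rw [hAG i j hi hj, if_pos (List.mem_range.mpr hi)]
    have hrhs : pvGG ((List.range N).map (fun i => (List.range N).map (fun j => pvFB a i j N))) i j
        = pvFB a i j N := by
      unfold pvGG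
      rw [PySem.List.getD_map_range _ _ _ _ hi, PySem.List.getD_map_range _ _ _ _ hj]
    rw [hrhs, pvS1, pvFB]
    apply congrArg
    apply List.map_congr_left
    intro k hk
    rw [List.mem_range] at hk
    rw [htranGG j k hj hk, mul_comm]
  · refine list_eq_of_getD (N := N) hAL (by simp) ?_
    intro i hi
    rw [hAB i hi, if_pos (List.mem_range.mpr hi),
      PySem.List.getD_map_range _ _ _ _ hi, pvS2, pvGB]
    apply congrArg
    apply List.map_congr_left
    intro j hj
    rw [List.mem_range] at hj
    rw [htranGG i j hi hj]
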